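-- pv_equiv track=rewrite | github.com/CemAlpturk/Everybody-Codes | Events/the_kingdom_of_algorithmia/quest_7/quest_7.py | process_racetrack
-- ===== SOURCE A (Python) =====
-- def process_racetrack(lines: list[str]) -> list[str]:
--     p1 = [s for s in lines[0].strip("\n")]
--     p2 = []
--     for line in lines:
--         line = line.strip("\n")
--         p2.append(line[-1])
--     p2 = p2[1:]
--
--     p3 = [s for s in lines[-1].strip("\n")][::-1][1:]
--     p4 = []
--     for line in lines:
--         line = line.strip("\n")
--         p4.append(line[0])
--     p4 = p4[1:-1][::-1]
--
--     racetrack = p1 + p2 + p3 + p4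
--     racetrack.append(racetrack.pop(0))
--     return racetrack
-- ===== SOURCE B (Python) =====
-- def process_racetrack(lines: list[str]) -> list[str]:
--     # Closed-form border addressing: instead of concatenating piece lists and
--     # rotating, compute the perimeter length P and decode each output position
--     # k directly to the grid cell holding its character, reading position
--     # (k+1) mod P to absorb the rotation into index arithmetic.
--     ls = [l.strip("\n") for l in lines]
--     n = len(ls)
--     w0, wb = len(ls[0]), len(ls[-1])
--     P = w0 + (n - 1) + (wb - 1) + max(n - 2, 0)
--
--     def cell(k: int) -> str:
--         if k < w0:                      # top row, left to right
--             return ls[0][k]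
--         k -= w0
--         if k < n - 1:                   # right edge, top to bottom
--             return ls[k + 1][-1]
--         k -= n - 1
--         if k < wb - 1:                  # bottom row, right to left
--             return ls[-1][wb - 2 - k]
--         k -= wb - 1                     # left edge, bottom to top
--         return ls[n - 2 - k][0]
--
--     return [cell((k + 1) % P) for k in range(P)]
-- ===== Notes on version B (the rewrite author's own statement) =====
-- stated objective: alternative
-- what changed: Instead of materialising four border piece-lists, concatenating and rotating them, B computes the perimeter length P in closed form and builds the result as a single comprehension that decodes each output index (k+1) mod P directly to the grid cell holding its character, so no intermediate lists, reversals or pop/append rotation exist.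
import Mathlib
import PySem

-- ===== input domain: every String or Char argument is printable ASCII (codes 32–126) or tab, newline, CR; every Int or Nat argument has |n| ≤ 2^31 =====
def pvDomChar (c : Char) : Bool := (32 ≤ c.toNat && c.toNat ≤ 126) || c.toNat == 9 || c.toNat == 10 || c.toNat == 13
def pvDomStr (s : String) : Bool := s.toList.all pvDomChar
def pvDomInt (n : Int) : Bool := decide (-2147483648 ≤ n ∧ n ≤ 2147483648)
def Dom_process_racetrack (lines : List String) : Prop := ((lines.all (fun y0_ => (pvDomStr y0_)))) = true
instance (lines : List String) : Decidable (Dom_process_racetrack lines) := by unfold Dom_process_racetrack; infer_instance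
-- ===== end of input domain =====

-- B replaces A's four piece-lists + final pop/append rotation by closed-form index
-- decoding: each output position k is decoded to the border cell (k+1) mod P.

-- shared helpers: line.strip("\n") as a char list, and a 1-char Python string
def stripNl (s : String) : List Char := PySem.Chars.stripChars s.toList ['\n']
def oneCh (c : Char) : String := String.ofList [c]

-- ===== PORT A =====
def process_racetrack (lines : List String) : List String :=
  -- p1 = [s for s in lines[0].strip("\n")]
  let p1 : List String := (stripNl (PySem.List.pyGetD lines 0 "")).map oneCh
  -- p2 loop: append line[-1] for each line, then p2 = p2[1:]
  let p2full : List String :=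
    lines.foldl (fun acc line => acc ++ [oneCh (PySem.List.pyGetD (stripNl line) (-1) ' ')]) []
  let p2 : List String := PySem.List.slice p2full (some 1) none
  -- p3 = [s for s in lines[-1].strip("\n")][::-1][1:]
  let p3 : List String :=
    PySem.List.slice
      ((PySem.List.slice? ((stripNl (PySem.List.pyGetD lines (-1) "")).map oneCh) none none (-1)).getD [])
      (some 1) none
  -- p4 loop: append line[0] for each line, then p4 = p4[1:-1][::-1]
  let p4full : List String :=
    lines.foldl (fun acc line => acc ++ [oneCh (PySem.List.pyGetD (stripNl line) 0 ' ')]) []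
  let p4 : List String :=
    (PySem.List.slice? (PySem.List.slice p4full (some 1) (some (-1))) none none (-1)).getD []
  let racetrack := p1 ++ p2 ++ p3 ++ p4
  -- racetrack.append(racetrack.pop(0))
  match PySem.List.pop? racetrack 0 with
  | some (x, rest) => rest ++ [x]
  | none => []   -- Python raises IndexError here; excluded by Pre_

-- ===== PORT B =====
-- Source B's nested 'def cell(k)': decode border index k to its grid cell
def cellB (ls : List (List Char)) (n w0 wb : Int) (k : Int) : String :=
  if k < w0 then
    oneCh (PySem.List.pyGetD (PySem.List.pyGetD ls 0 []) k ' ')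
  else if k - w0 < n - 1 then
    oneCh (PySem.List.pyGetD (PySem.List.pyGetD ls (k - w0 + 1) []) (-1) ' ')
  else if k - w0 - (n - 1) < wb - 1 then
    oneCh (PySem.List.pyGetD (PySem.List.pyGetD ls (-1) []) (wb - 2 - (k - w0 - (n - 1))) ' ')
  else
    oneCh (PySem.List.pyGetD (PySem.List.pyGetD ls (n - 2 - (k - w0 - (n - 1) - (wb - 1))) []) 0 ' ')

def process_racetrack_alt (lines : List String) : List String :=
  let ls : List (List Char) := lines.map stripNl
  let n : Int := (ls.length : Int)
  let w0 : Int := ((PySem.List.pyGetD ls 0 []).length : Int)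
  let wb : Int := ((PySem.List.pyGetD ls (-1) []).length : Int)
  let P : Int := w0 + (n - 1) + (wb - 1) + max (n - 2) 0
  (PySem.List.pyRange 0 P 1).map (fun k => cellB ls n w0 wb (PySem.Int.mod (k + 1) P))

-- ===== PRECONDITION & SPEC =====
-- Pre_ excludes exactly the inputs where Python A raises IndexError:
-- the empty list (lines[0]) and any line whose '\n'-strip is empty (line[-1]).
def Pre_process_racetrack (lines : List String) : Prop :=
  lines ≠ [] ∧ ∀ l ∈ lines, stripNl l ≠ []
instance (lines : List String) : Decidable (Pre_process_racetrack lines) := by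
  unfold Pre_process_racetrack; infer_instance
def pvWitness_process_racetrack : List String := ["abc", "d f", "ghi"]

def Spec_process_racetrack (lines : List String) (out : List String) : Prop := out = process_racetrack_alt lines
instance (lines : List String) (out : List String) : Decidable (Spec_process_racetrack lines out) := by unfold Spec_process_racetrack; infer_instance

-- ===== CLAIM (what is proved, stated in full; the proofs are below) =====
def Claim_equal_process_racetrack : Prop := ∀ (lines : List String), Dom_process_racetrack lines → Pre_process_racetrack lines → Spec_process_racetrack lines (process_racetrack lines)

-- ===== LEMMAS AND PROOFS =====

-- A's border p1 ++ p2 ++ p3 ++ p4 in normalized form, for input x :: t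
def borderOf (x : String) (t : List String) : List String :=
  (stripNl x).map oneCh
  ++ (t.map stripNl).map (fun l => oneCh (PySem.List.pyGetD l (-1) ' '))
  ++ ((PySem.List.pyGetD (stripNl x :: t.map stripNl) (-1) []).reverse.tail).map oneCh
  ++ ((t.map stripNl).dropLast.reverse).map (fun l => oneCh (PySem.List.pyGetD l 0 ' '))

theorem slice_one_neg_one {α : Type} (xs : List α) :
    PySem.List.slice xs (some 1) (some (-1)) = xs.tail.dropLast := by
  cases xs with
  | nil => rfl
  | cons x t =>
    simp only [PySem.List.slice, PySem.List.clampIdx, List.dropLast_eq_take]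
    split_ifs <;> simp_all
    omega

theorem borderOf_ne_nil (x : String) (t : List String) (hx : stripNl x ≠ []) :
    borderOf x t ≠ [] := by
  unfold borderOf
  simp [hx]

theorem headI_eq_head {α : Type} [Inhabited α] (l : List α) (h : l ≠ []) : l.headI = l.head h := by
  cases l with
  | nil => exact absurd rfl h
  | cons u v => rfl

-- pyGetD on an append, nonnegative index
theorem pyGetD_append {α : Type} (xs ys : List α) (j : Int) (d : α) (h0 : 0 ≤ j) :
    PySem.List.pyGetD (xs ++ ys) j d =
      if j < (xs.length : Int) then PySem.List.pyGetD xs j d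
      else PySem.List.pyGetD ys (j - xs.length) d := by
  obtain ⟨n, rfl⟩ := Int.eq_ofNat_of_zero_le h0
  split_ifs with h
  · rw [PySem.List.pyGetD_natCast, PySem.List.pyGetD_natCast]
    rw [List.getD_eq_getElem?_getD, List.getD_eq_getElem?_getD,
        List.getElem?_append_left (by exact_mod_cast h)]
  · have hle : xs.length ≤ n := by omega
    have : ((n : Int) - xs.length) = ((n - xs.length : Nat) : Int) := by omega
    rw [this, PySem.List.pyGetD_natCast, PySem.List.pyGetD_natCast]
    rw [List.getD_eq_getElem?_getD, List.getD_eq_getElem?_getD,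
        List.getElem?_append_right hle]

-- pyGetD past the head of a cons
theorem pyGetD_cons_succ {α : Type} (x : α) (xs : List α) (k : Int) (d : α) (h0 : 0 ≤ k) :
    PySem.List.pyGetD (x :: xs) (k + 1) d = PySem.List.pyGetD xs k d := by
  obtain ⟨n, rfl⟩ := Int.eq_ofNat_of_zero_le h0
  have : ((n : Int) + 1) = ((n + 1 : Nat) : Int) := by omega
  rw [this, PySem.List.pyGetD_natCast, PySem.List.pyGetD_natCast]
  simp [List.getD_eq_getElem?_getD]

-- rotation as index arithmetic: mapping (k+1) mod P over range(P)
theorem rot_index_map {α : Type} (g : Int → α) (d : α) (L : List α) (hL : L ≠ [])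
    (hg : ∀ j : Int, 0 ≤ j → j < (L.length : Int) → g j = PySem.List.pyGetD L j d) :
    (PySem.List.pyRange 0 (L.length : Int) 1).map
        (fun k => g (PySem.Int.mod (k + 1) (L.length : Int)))
      = L.tail ++ [L.head hL] := by
  set P : Int := (L.length : Int) with hPdef
  have hP : 0 < P := by
    have := List.length_pos_of_ne_nil hL; omega
  have hmap1 : (PySem.List.pyRange 0 P 1).map (fun k => g (PySem.Int.mod (k + 1) P))
      = (PySem.List.pyRange 0 P 1).map (fun k => PySem.List.pyGetD L (PySem.Int.mod (k + 1) P) d) := by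
    apply List.map_congr_left
    intro k hk
    rw [PySem.List.mem_pyRange_one] at hk
    rw [PySem.Int.mod_eq_emod_of_pos hP]
    exact hg _ (Int.emod_nonneg _ (by omega)) (Int.emod_lt_of_pos _ hP)
  rw [hmap1]
  have hsplit : PySem.List.pyRange 0 P 1 = PySem.List.pyRange 0 (P - 1) 1 ++ [P - 1] := by
    have h := PySem.List.pyRange_one_succ_right (a := 0) (b := P - 1) (by omega)
    simpa using h
  rw [hsplit, List.map_append, List.map_singleton]
  have hlast : PySem.Int.mod ((P - 1) + 1) P = 0 := by
    rw [PySem.Int.mod_eq_emod_of_pos hP]; simp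
  have hhead : PySem.List.pyGetD L 0 d = L.head hL := by
    cases L with
    | nil => exact absurd rfl hL
    | cons a l => simp [PySem.List.pyGetD_zero_cons]
  rw [hlast, hhead]
  congr 1
  have hmap2 : (PySem.List.pyRange 0 (P - 1) 1).map (fun k => PySem.List.pyGetD L (PySem.Int.mod (k + 1) P) d)
      = (PySem.List.pyRange 1 P 1).map (fun j => PySem.List.pyGetD L j d) := by
    rw [PySem.List.pyRange_one 0 (P-1), PySem.List.pyRange_one 1 P, List.map_map, List.map_map]
    simp only [sub_zero]
    apply List.map_congr_left
    intro k hk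
    simp only [List.mem_range] at hk
    have hk' : (k : Int) < P - 1 := by omega
    simp only [Function.comp]
    have : PySem.Int.mod (0 + (k:Int) + 1) P = 1 + k := by
      rw [PySem.Int.mod_eq_emod_of_pos hP, Int.emod_eq_of_lt (by omega) (by omega)]
      omega
    rw [this]
  rw [hmap2]
  have h2 := PySem.List.map_pyGetD_pyRange' (xs := L) (d := d) (a := 1) (by omega)
  simpa [List.drop_one] using h2

-- A's port computes the rotated border
theorem portA_eq (x : String) (t : List String) (hx : stripNl x ≠ []) :
    process_racetrack (x :: t)
      = (borderOf x t).tail ++ [(borderOf x t).headI] := by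
  unfold process_racetrack borderOf
  simp only [PySem.List.foldl_append_singleton_eq_map, PySem.List.slice_from_one,
    PySem.List.slice?_none_none_neg_one, Option.getD_some, slice_one_neg_one,
    PySem.List.slice_to_neg_one, PySem.List.pyGetD_zero_cons,
    PySem.List.pyGetD_neg_one (d := "") (h := List.cons_ne_nil x t),
    List.map_cons, List.tail_cons]
  have hc : stripNl x :: List.map stripNl t ≠ [] := by simp
  rw [PySem.List.pyGetD_neg_one (d := ([] : List Char)) (h := hc)]
  obtain ⟨c, cs, hxc⟩ := List.exists_cons_of_ne_nil hx
  simp only [hxc, List.map_cons, List.cons_append, List.nil_append,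
    PySem.List.pop?_zero_cons, List.tail_cons, PySem.List.pyGetD_zero_cons, List.headI_cons]
  simp only [List.map_map, Function.comp_def, ← List.map_reverse,
    ← List.map_tail, List.tail_reverse, List.append_assoc]
  have hcast : ((c :: cs) :: List.map stripNl t) = (x :: t).map stripNl := by
    simp [hxc]
  simp only [hcast, List.getLast_map]
  simp [← List.map_dropLast, ← List.map_reverse, List.map_map, Function.comp_def]

-- ===== VERDICT (by name: the statement is the Claim_ definition above) =====
theorem process_racetrack_spec : Claim_equal_process_racetrack := by
  intro lines _ hpre
  obtain ⟨hne, hall⟩ := hpre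
  cases lines with
  | nil => exact absurd rfl hne
  | cons x t =>
    unfold Spec_process_racetrack
    have hx : stripNl x ≠ [] := hall x (by simp)
    rw [portA_eq x t hx]
    unfold process_racetrack_alt
    simp only [List.map_cons, PySem.List.pyGetD_zero_cons]
    set a := stripNl x with ha'
    set m := List.map stripNl t with hm'
    set b := PySem.List.pyGetD (a :: m) (-1) [] with hb'
    set L := borderOf x t with hL'
    have hL : L ≠ [] := borderOf_ne_nil x t hx
    have hbm : b ∈ (a :: m) := by
      rw [hb', PySem.List.pyGetD_neg_one (h := by simp)]
      exact List.getLast_mem _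
    have hb : b ≠ [] := by
      rcases List.mem_cons.mp hbm with heq | hmem
      · rw [heq]; exact hx
      · simp only [hm', List.mem_map] at hmem
        obtain ⟨l, hl, hlb⟩ := hmem
        rw [← hlb]
        exact hall l (by simp [hl])
    have hbl : 1 ≤ b.length := List.length_pos_of_ne_nil hb
    have hlen : ((a.length : Int) + (((a :: m).length : Int) - 1) + ((b.length : Int) - 1)
        + max (((a :: m).length : Int) - 2) 0) = (L.length : Int) := by
      have h1 : L.length = a.length + m.length + (b.length - 1) + (m.length - 1) := by
        simp [hL', borderOf, ← ha', ← hm', ← hb']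
        omega
      rw [h1]
      simp only [List.length_cons]
      omega
    have hg : ∀ j : Int, 0 ≤ j → j < (L.length : Int) →
        cellB (a :: m) ((a :: m).length : Int) (a.length : Int) (b.length : Int) j
          = PySem.List.pyGetD L j (oneCh ' ') := by
      intro j h0 hj
      rw [← hlen] at hj
      have hL4 : L = List.map oneCh a
          ++ (List.map (fun l => oneCh (PySem.List.pyGetD l (-1) ' ')) m
          ++ (List.map oneCh b.reverse.tail
          ++ List.map (fun l => oneCh (PySem.List.pyGetD l 0 ' ')) m.dropLast.reverse)) := by
        rw [hL']
        unfold borderOf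
        rw [← ha', ← hm', ← hb']
        simp [List.append_assoc]
      rw [hL4, pyGetD_append _ _ _ _ h0]
      unfold cellB
      rw [PySem.List.pyGetD_zero_cons]
      simp only [List.length_map, List.length_cons, List.length_reverse, List.length_tail,
        List.length_dropLast, Nat.cast_add, Nat.cast_one] at hj ⊢
      by_cases h1 : j < (a.length : Int)
      · rw [if_pos h1, if_pos h1]
        exact (PySem.List.pyGetD_map oneCh a j ' ').symm
      · rw [if_neg h1, if_neg h1]
        rw [pyGetD_append _ _ _ _ (by omega : (0:Int) ≤ j - ↑a.length)]
        simp only [List.length_map, List.length_reverse, List.length_tail]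
        by_cases h2 : j - (a.length : Int) < (m.length : Int)
        · rw [if_pos (show j - (a.length : Int) < ↑m.length + 1 - 1 from by omega), if_pos h2]
          rw [pyGetD_cons_succ _ _ _ _ (by omega : (0:Int) ≤ j - ↑a.length)]
          have hd : (oneCh ' ') = (fun l => oneCh (PySem.List.pyGetD l (-1) ' ')) ([] : List Char) := rfl
          rw [hd, PySem.List.pyGetD_map]
        · rw [if_neg (show ¬ (j - (a.length : Int) < ↑m.length + 1 - 1) from by omega), if_neg h2]
          rw [pyGetD_append _ _ _ _ (by omega : (0:Int) ≤ j - ↑a.length - ↑m.length)]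
          simp only [List.length_map, List.length_reverse, List.length_tail, List.length_dropLast]
          by_cases h3 : j - (a.length : Int) - ↑m.length < (b.length : Int) - 1
          · rw [if_pos (show j - (a.length : Int) - (↑m.length + 1 - 1) < ↑b.length - 1 from by omega),
               if_pos (show j - (a.length : Int) - ↑m.length < ((b.length - 1 : Nat) : Int) from by omega)]
            rw [PySem.List.pyGetD_map oneCh b.reverse.tail _ ' ']
            have hinner : PySem.List.pyGetD b (↑b.length - 2 - (j - ↑a.length - (↑m.length + 1 - 1))) ' '
                = PySem.List.pyGetD b.reverse.tail (j - ↑a.length - ↑m.length) ' ' := by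
              rw [PySem.List.pyGetD_eq_getElem b ' ' (by omega) (by omega)]
              rw [PySem.List.pyGetD_eq_getElem b.reverse.tail ' ' (by omega)
                (by simp only [List.length_tail, List.length_reverse]; omega)]
              rw [List.getElem_tail, List.getElem_reverse]
              congr 1
              omega
            rw [hinner]
          · rw [if_neg (show ¬ (j - (a.length : Int) - (↑m.length + 1 - 1) < ↑b.length - 1) from by omega),
               if_neg (show ¬ (j - (a.length : Int) - ↑m.length < ((b.length - 1 : Nat) : Int)) from by omega)]
            have hd4 : (oneCh ' ') = (fun l => oneCh (PySem.List.pyGetD l 0 ' ')) ([] : List Char) := rfl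
            rw [hd4, PySem.List.pyGetD_map]
            have hk3 : (0:Int) ≤ j - ↑a.length - ↑m.length - ((b.length - 1 : Nat) : Int) := by omega
            have hstep : (↑m.length + 1 - 2 - (j - ↑a.length - (↑m.length + 1 - 1) - (↑b.length - 1)) : Int)
                = (↑m.length + 1 - 2 - (j - ↑a.length - (↑m.length + 1 - 1) - (↑b.length - 1)) - 1) + 1 := by ring
            rw [hstep, pyGetD_cons_succ _ _ _ _ (by omega)]
            have hinner : PySem.List.pyGetD m
                  (↑m.length + 1 - 2 - (j - ↑a.length - (↑m.length + 1 - 1) - (↑b.length - 1)) - 1) []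
                = PySem.List.pyGetD m.dropLast.reverse (j - ↑a.length - ↑m.length - ((b.length - 1 : Nat) : Int)) [] := by
              rw [PySem.List.pyGetD_eq_getElem m [] (by omega) (by omega)]
              rw [PySem.List.pyGetD_eq_getElem m.dropLast.reverse [] (by omega)
                (by simp only [List.length_reverse, List.length_dropLast]; omega)]
              rw [List.getElem_reverse, List.getElem_dropLast]
              simp only [List.length_dropLast]
              congr 1
              omega
            rw [hinner]
    rw [hlen]
    rw [headI_eq_head L hL]
    exact (rot_index_map (cellB (a :: m) ((a :: m).length : Int) (a.length : Int) (b.length : Int))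
      (oneCh ' ') L hL hg).symm
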